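-- pv_equiv track=rewrite | github.com/AndresFWilT/MisionTIC-2022_C1 | venv/Scripts/reto_2MINTIC2022c1.py | Porty
-- ===== SOURCE A (Python) =====
-- def Porty(e,p):
--     arreglo = "";
--     punt=0;
--     for i in range(len(p)):
--         if(p[i] in e):
--             punt+=1;
--             arreglo += str(punt)+" ";
--         else:
--             arreglo += str(punt)+" ";
--     return arreglo;
-- ===== SOURCE B (Python) =====
-- def Porty(e, p):
--     # Run-length construction: the output is constant between "hits" (positions of
--     # chars of p that occur in e); emit each constant block by string repetition.
--     hits = [i for i, c in enumerate(p) if c in e]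
--     out = []
--     prev = 0
--     for k, i in enumerate(hits):
--         out.append((str(k) + ' ') * (i - prev))
--         out.append(str(k + 1) + ' ')
--         prev = i + 1
--     out.append((str(len(hits)) + ' ') * (len(p) - prev))
--     return ''.join(out)
-- ===== Notes on version B (the rewrite author's own statement) =====
-- stated objective: alternative
-- what changed: Instead of A's per-character loop with a running counter, B first computes the list of hit positions (indices of p whose char occurs in e) and then emits the output as run-length blocks: for each hit it appends the previous count repeated over the gap by string multiplication plus the incremented count, with one final repeated block after the last hit.
import Mathlib
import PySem

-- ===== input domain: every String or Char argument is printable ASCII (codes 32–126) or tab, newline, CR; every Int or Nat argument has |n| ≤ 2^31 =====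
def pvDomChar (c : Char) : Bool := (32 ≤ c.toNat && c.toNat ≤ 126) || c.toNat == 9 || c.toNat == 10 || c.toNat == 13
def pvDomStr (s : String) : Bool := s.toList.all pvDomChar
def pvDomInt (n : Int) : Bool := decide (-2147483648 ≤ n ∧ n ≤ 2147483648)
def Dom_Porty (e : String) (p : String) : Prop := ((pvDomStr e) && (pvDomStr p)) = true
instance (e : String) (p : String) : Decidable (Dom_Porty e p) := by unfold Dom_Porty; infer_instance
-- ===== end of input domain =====

-- B replaces A's per-character counter loop by a run-length construction over the hit positions; same result, no speed claim.

-- ===== PORT A =====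
-- the Python loop 'for i in range(len(p))' reads p[i] for i = 0..len(p)-1, i.e. p's chars in order
def Porty (e : String) (p : String) : String :=
  (p.toList.foldl
    (fun (st : String × Int) c =>
      if e.toList.contains c then
        (st.1 ++ (PySem.Int.toStr (st.2 + 1) ++ " "), st.2 + 1)
      else
        (st.1 ++ (PySem.Int.toStr st.2 ++ " "), st.2))
    ("", 0)).1

-- ===== PORT B =====
-- hand port of Python's `s * n` on strings (empty for n ≤ 0); exact for every int n
def pvRep (s : String) (n : Nat) : String :=
  match n with
  | 0 => ""
  | Nat.succ m => s ++ pvRep s m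

def pyStrMul (s : String) (n : Int) : String := pvRep s n.toNat

def Porty_alt (e : String) (p : String) : String :=
  let hits : List Int :=
    (PySem.List.enumerate p.toList).filterMap
      (fun ic => if e.toList.contains ic.2 then some ic.1 else none)
  let st :=
    (PySem.List.enumerate hits).foldl
      (fun (st : List String × Int) ki =>
        (st.1 ++ [pyStrMul (PySem.Int.toStr ki.1 ++ " ") (ki.2 - st.2),
                  PySem.Int.toStr (ki.1 + 1) ++ " "],
         ki.2 + 1))
      ([], 0)
  String.join (st.1 ++ [pyStrMul (PySem.Int.toStr (hits.length : Int) ++ " ")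
                          ((p.toList.length : Int) - st.2)])

-- ===== PRECONDITION & SPEC =====
def Spec_Porty (e : String) (p : String) (out : String) : Prop := out = Porty_alt e p
instance (e : String) (p : String) (out : String) : Decidable (Spec_Porty e p out) := by unfold Spec_Porty; infer_instance

-- ===== CLAIM (what is proved, stated in full; the proofs are below) =====
def Claim_equal_Porty : Prop := ∀ (e : String) (p : String), Dom_Porty e p → Spec_Porty e p (Porty e p)

-- ===== LEMMAS AND PROOFS =====

def pvFmt (n : Int) : String := PySem.Int.toStr n ++ " "

-- running prefix sums of a flag list starting from n
def pvTotals (n : Int) : List Int → List Int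
  | [] => []
  | f :: fs => (n + f) :: pvTotals (n + f) fs

-- the canonical output: formatted prefix counts
def pvCanon (e : String) (k : Int) (l : List Char) : String :=
  String.join ((pvTotals k (l.map (fun c => if e.toList.contains c then (1 : Int) else 0))).map pvFmt)

theorem pvFoldl_append (xs : List String) : ∀ (s : String),
    List.foldl (· ++ ·) s xs = s ++ List.foldl (· ++ ·) "" xs := by
  induction xs with
  | nil => intro s; simp
  | cons y ys ih =>
    intro s
    simp only [List.foldl]
    rw [ih (s ++ y), ih ("" ++ y)]
    simp [String.append_assoc]

theorem pvJoin_cons (x : String) (xs : List String) :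
    String.join (x :: xs) = x ++ String.join xs := by
  unfold String.join
  simp only [List.foldl]
  rw [pvFoldl_append]
  simp

-- ---- A's loop equals the canonical output ----
theorem pvA_fold (e : String) (l : List Char) (s : String) (n : Int) :
    l.foldl
      (fun (st : String × Int) c =>
        if e.toList.contains c then
          (st.1 ++ (PySem.Int.toStr (st.2 + 1) ++ " "), st.2 + 1)
        else
          (st.1 ++ (PySem.Int.toStr st.2 ++ " "), st.2))
      (s, n)
      = (s ++ String.join ((pvTotals n (l.map (fun c => if e.toList.contains c then (1 : Int) else 0))).map pvFmt),
         n + (l.map (fun c => if e.toList.contains c then (1 : Int) else 0)).sum) := by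
  induction l generalizing s n with
  | nil => simp [pvTotals, String.join]
  | cons c cs ih =>
    simp only [List.foldl, List.map_cons, List.sum_cons]
    by_cases h : e.toList.contains c = true
    · rw [if_pos h, ih, if_pos h, pvTotals, List.map_cons, pvJoin_cons, String.append_assoc]
      exact Prod.ext rfl (by ring)
    · rw [if_neg h, ih, if_neg h, pvTotals, List.map_cons, pvJoin_cons, String.append_assoc]
      simp [pvFmt]

-- ---- hit positions ----
def pvHitIdx (e : String) (base : Int) : List Char → List Int
  | [] => []
  | c :: cs => if e.toList.contains c then base :: pvHitIdx e (base + 1) cs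
               else pvHitIdx e (base + 1) cs

theorem pvTotals_cons (n f : Int) (fs : List Int) :
    pvTotals n (f :: fs) = (n + f) :: pvTotals (n + f) fs := rfl

theorem pvJoin_single (x : String) : String.join [x] = x := by
  rw [pvJoin_cons]; simp [String.join]

theorem pvJoin_head_append (a b : String) (xs : List String) :
    String.join ((a ++ b) :: xs) = a ++ String.join (b :: xs) := by
  rw [pvJoin_cons, pvJoin_cons, String.append_assoc]

theorem pvHits_eq (e : String) (l : List Char) (s : Int) :
    (PySem.List.enumerate l s).filterMap
      (fun ic => if e.toList.contains ic.2 then some ic.1 else none)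
      = pvHitIdx e s l := by
  induction l generalizing s with
  | nil => simp [PySem.List.enumerate_nil, pvHitIdx]
  | cons c cs ih =>
    rw [PySem.List.enumerate_cons]
    by_cases h : c ∈ e.toList
    · simp only [List.filterMap_cons]
      simp [h, pvHitIdx]
      simpa using ih (s + 1)
    · simp only [List.filterMap_cons]
      simp [h, pvHitIdx]
      simpa using ih (s + 1)

theorem pvHitIdx_ge (e : String) (l : List Char) (b : Int) :
    ∀ i ∈ pvHitIdx e b l, b ≤ i := by
  induction l generalizing b with
  | nil => simp [pvHitIdx]
  | cons c cs ih =>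
    intro i hi
    unfold pvHitIdx at hi
    by_cases h : c ∈ e.toList
    · rw [if_pos (by simpa using h)] at hi
      rcases List.mem_cons.mp hi with h1 | h1
      · omega
      · have := ih (b + 1) i h1; omega
    · rw [if_neg (by simpa using h)] at hi
      have := ih (b + 1) i hi; omega

-- ---- B's fold as a structural recursion ----
def pvPieces (k prev : Int) : List Int → List String × Int
  | [] => ([], prev)
  | i :: hs =>
    let r := pvPieces (k + 1) (i + 1) hs
    (pyStrMul (pvFmt k) (i - prev) :: pvFmt (k + 1) :: r.1, r.2)

theorem pvB_fold (hs : List Int) : ∀ (k prev : Int) (acc : List String),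
    (PySem.List.enumerate hs k).foldl
      (fun (st : List String × Int) ki =>
        (st.1 ++ [pyStrMul (PySem.Int.toStr ki.1 ++ " ") (ki.2 - st.2),
                  PySem.Int.toStr (ki.1 + 1) ++ " "],
         ki.2 + 1))
      (acc, prev)
      = (acc ++ (pvPieces k prev hs).1, (pvPieces k prev hs).2) := by
  induction hs with
  | nil => intro k prev acc; simp [PySem.List.enumerate_nil, pvPieces]
  | cons i hs ih =>
    intro k prev acc
    rw [PySem.List.enumerate_cons]
    simp only [List.foldl]
    rw [ih]
    simp [pvPieces, pvFmt]

def pvTail (k prev endN : Int) (hs : List Int) : String :=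
  String.join ((pvPieces k prev hs).1 ++
    [pyStrMul (pvFmt (k + hs.length)) (endN - (pvPieces k prev hs).2)])

theorem pvRep_succ (s : String) (n : Int) (h : 1 ≤ n) :
    pyStrMul s n = s ++ pyStrMul s (n - 1) := by
  unfold pyStrMul
  have : n.toNat = (n - 1).toNat + 1 := by omega
  rw [this]
  rfl

theorem pvTail_shift (hs : List Int) (k prev endN : Int)
    (hge : ∀ i ∈ hs, prev + 1 ≤ i) (hend : prev + 1 ≤ endN) :
    pvTail k prev endN hs = pvFmt k ++ pvTail k (prev + 1) endN hs := by
  cases hs with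
  | nil =>
    unfold pvTail pvPieces
    simp only [List.length_nil, Nat.cast_zero, add_zero, List.nil_append, pvJoin_single]
    rw [pvRep_succ _ _ (show (1:Int) ≤ endN - prev by omega)]
    have h1 : endN - prev - 1 = endN - (prev + 1) := by omega
    rw [h1]
  | cons i hs' =>
    have hi : prev + 1 ≤ i := hge i (List.mem_cons_self)
    unfold pvTail pvPieces
    rw [pvRep_succ (pvFmt k) (i - prev) (by omega)]
    have h1 : i - prev - 1 = i - (prev + 1) := by omega
    rw [h1]
    exact pvJoin_head_append _ _ _

theorem pvTail_canon (e : String) (l : List Char) : ∀ (base k : Int),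
    pvTail k base (base + l.length) (pvHitIdx e base l) = pvCanon e k l := by
  induction l with
  | nil =>
    intro base k
    unfold pvTail pvCanon pvTotals
    simp [pvHitIdx, pvPieces, pyStrMul, pvRep, String.join]
  | cons c cs ih =>
    intro base k
    unfold pvHitIdx
    by_cases h : c ∈ e.toList
    · rw [if_pos (by simpa using h)]
      unfold pvTail pvPieces
      have hz : pyStrMul (pvFmt k) (base - base) = "" := by
        simp [pyStrMul, pvRep]
      rw [hz]
      have hlen : (k + ((base :: pvHitIdx e (base + 1) cs).length : Int))
          = (k + 1) + ((pvHitIdx e (base + 1) cs).length : Int) := by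
        simp; ring
      rw [hlen]
      have hend : (base + ((c :: cs).length : Int)) = (base + 1) + (cs.length : Int) := by
        simp; ring
      rw [hend]
      have hih := ih (base + 1) (k + 1)
      unfold pvTail at hih
      rw [List.cons_append, List.cons_append, pvJoin_cons, pvJoin_cons, hih]
      simp [pvCanon, h, pvTotals_cons, pvJoin_cons, pvFmt, List.map_cons]
    · rw [if_neg (by simpa using h)]
      have hshift := pvTail_shift (pvHitIdx e (base + 1) cs) k base
          (base + ((c :: cs).length : Int))
          (fun i hi => pvHitIdx_ge e cs (base + 1) i hi)
          (by simp)
      rw [hshift]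
      have hend : (base + ((c :: cs).length : Int)) = (base + 1) + (cs.length : Int) := by
        simp; ring
      rw [hend, ih (base + 1) k]
      simp [pvCanon, h, pvTotals_cons, pvJoin_cons, pvFmt, List.map_cons]

-- ===== VERDICT (by name: the statement is the Claim_ definition above) =====
theorem Porty_spec : Claim_equal_Porty := by
  intro e p _
  unfold Spec_Porty
  have hA : Porty e p = pvCanon e 0 p.toList := by
    unfold Porty pvCanon
    rw [pvA_fold]
    simp [pvFmt]
  have hB : Porty_alt e p
      = pvTail 0 0 ((p.toList.length : Int)) (pvHitIdx e 0 p.toList) := by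
    simp only [Porty_alt]
    rw [pvHits_eq, pvB_fold]
    unfold pvTail
    simp [pvFmt]
  have hC := pvTail_canon e p.toList 0 0
  simp only [zero_add] at hC
  rw [hA, hB, hC]
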